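-- pv_equiv track=rewrite | github.com/DimitraGkini123/verifier_wifi | policy_device_lr.py | _device_key
-- ===== SOURCE A (Python) =====
-- def _device_key(device_id: str) -> int:
--     """
--     Your training used int device_id.
--     Your runtime device_id is like "pico2w_1".
--     We'll map "pico2w_1" -> 1.
--     If you use other naming, adjust this.
--     """
--     # robust parse: take trailing digits
--     digits = ""
--     for ch in reversed(device_id):
--         if ch.isdigit():
--             digits = ch + digits
--         elif digits:
--             break
--     if not digits:
--         raise ValueError(f"Cannot parse numeric id from device_id={device_id!r}")
--     return int(digits)
-- ===== SOURCE B (Python) =====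
-- def _device_key(device_id: str) -> int:
--     # Forward pass: collect every maximal run of digits, take the rightmost.
--     runs = []
--     cur = ""
--     for ch in device_id:
--         if ch.isdigit():
--             cur += ch
--         elif cur:
--             runs.append(cur)
--             cur = ""
--     if cur:
--         runs.append(cur)
--     if not runs:
--         raise ValueError(f"Cannot parse numeric id from device_id={device_id!r}")
--     return int(runs[-1])
-- ===== Notes on version B (the rewrite author's own statement) =====
-- stated objective: alternative
-- what changed: B replaces A's backward scan with break-on-gap state by a single forward pass that collects all maximal digit runs and returns int of the last one.
import Mathlib
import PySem

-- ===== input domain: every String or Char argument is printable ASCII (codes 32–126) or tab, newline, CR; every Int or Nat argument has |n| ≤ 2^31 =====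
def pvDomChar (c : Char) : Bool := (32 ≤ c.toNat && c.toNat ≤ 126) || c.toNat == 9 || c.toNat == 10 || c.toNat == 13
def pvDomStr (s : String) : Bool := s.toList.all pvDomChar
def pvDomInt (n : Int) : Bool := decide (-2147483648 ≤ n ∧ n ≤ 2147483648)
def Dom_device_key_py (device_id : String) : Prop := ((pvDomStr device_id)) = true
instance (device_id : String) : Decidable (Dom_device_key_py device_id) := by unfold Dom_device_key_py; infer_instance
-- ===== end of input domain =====

-- B scans forward collecting all maximal digit runs and takes the last, instead of A's backward break-on-gap scan (alternative decomposition, same cost).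


-- ===== PORT A =====
-- 'for ch in reversed(device_id): if ch.isdigit(): digits = ch + digits; elif digits: break'
def aGo : List Char → List Char → List Char
  | [], digits => digits
  | c :: rest, digits =>
    if PySem.Chars.isdigit c then aGo rest (c :: digits)
    else if digits ≠ [] then digits       -- break
    else aGo rest digits

def device_key_py (device_id : String) : Int :=
  let digits := aGo device_id.toList.reverse []
  if digits = [] then 0                    -- Python raises ValueError here (excluded by Pre_)
  else (PySem.Int.ofChars? digits).getD 0  -- int(digits); always succeeds on a nonempty digit run

-- ===== PORT B =====
-- one forward pass: state (runs, cur); digit extends cur, non-digit flushes a nonempty cur into runs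
def bStep (st : List (List Char) × List Char) (c : Char) : List (List Char) × List Char :=
  if PySem.Chars.isdigit c then (st.1, st.2 ++ [c])
  else if st.2 ≠ [] then (st.1 ++ [st.2], [])
  else st

def device_key_py_alt (device_id : String) : Int :=
  let st := device_id.toList.foldl bStep ([], [])
  let runs := if st.2 ≠ [] then st.1 ++ [st.2] else st.1   -- final flush
  match PySem.List.pyGet? runs (-1) with                   -- runs[-1]
  | some r => (PySem.Int.ofChars? r).getD 0                -- int(runs[-1]); always succeeds
  | none => 0                                              -- Python raises ValueError here (excluded by Pre_)

-- ===== PRECONDITION & SPEC =====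
-- Pre_ excludes exactly the strings with no digit: there both A and B raise ValueError.
def Pre_device_key_py (device_id : String) : Prop :=
  device_id.toList.any PySem.Chars.isdigit = true
instance (device_id : String) : Decidable (Pre_device_key_py device_id) := by
  unfold Pre_device_key_py; infer_instance
def pvWitness_device_key_py : String := "pico2w_1"

def Spec_device_key_py (device_id : String) (out : Int) : Prop := out = device_key_py_alt device_id
instance (device_id : String) (out : Int) : Decidable (Spec_device_key_py device_id out) := by unfold Spec_device_key_py; infer_instance

-- ===== CLAIM (what is proved, stated in full; the proofs are below) =====
def Claim_equal_device_key_py : Prop := ∀ (device_id : String), Dom_device_key_py device_id → Pre_device_key_py device_id → Spec_device_key_py device_id (device_key_py device_id)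

-- ===== LEMMAS AND PROOFS =====

-- A's scan with a nonempty accumulator just takes leading digits (break on first non-digit).
theorem aGo_nonempty (rev acc : List Char) (h : acc ≠ []) :
    aGo rev acc = (rev.takeWhile PySem.Chars.isdigit).reverse ++ acc := by
  induction rev generalizing acc with
  | nil => simp [aGo]
  | cons c cs ih =>
    by_cases hc : PySem.Chars.isdigit c
    · simp [aGo, hc, ih (c :: acc) (by simp)]
    · simp [aGo, hc, h]

-- The combined invariant of B's forward fold, by snoc induction: cur is the (reversed)
-- maximal digit suffix-run, no collected run is empty, and the last run is A's answer.
theorem bFold_inv (l : List Char) :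
    (l.foldl bStep ([], [])).2 = (l.reverse.takeWhile PySem.Chars.isdigit).reverse ∧
    (∀ r ∈ (if (l.foldl bStep ([], [])).2 ≠ [] then
              (l.foldl bStep ([], [])).1 ++ [(l.foldl bStep ([], [])).2]
            else (l.foldl bStep ([], [])).1), r ≠ []) ∧
    (if (l.foldl bStep ([], [])).2 ≠ [] then
       (l.foldl bStep ([], [])).1 ++ [(l.foldl bStep ([], [])).2]
     else (l.foldl bStep ([], [])).1).getLast?.getD [] = aGo l.reverse [] := by
  induction l using List.reverseRecOn with
  | nil => simp [aGo]
  | append_singleton l c ih =>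
    obtain ⟨hcur, hne, hlast⟩ := ih
    rw [List.foldl_append, List.foldl_cons, List.foldl_nil]
    rcases hf : l.foldl bStep ([], []) with ⟨runs, cur⟩
    rw [hf] at hcur hne hlast
    simp only at hcur hne hlast
    by_cases hc : PySem.Chars.isdigit c
    · refine ⟨by simp [bStep, hc, hcur], ?_, ?_⟩
      · intro r hr
        have hr' : r ∈ runs ∨ r = cur ++ [c] := by
          simpa [bStep, hc] using hr
        rcases hr' with h | h
        · exact hne r (by by_cases h2 : cur = [] <;> simp [h2, h])
        · simp [h]
      · simp only [bStep, hc, if_true, ne_eq, List.append_ne_nil_of_right_ne_nil,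
          not_false_eq_true, if_pos, List.getLast?_concat, Option.getD_some,
          List.reverse_append, List.reverse_singleton, List.singleton_append]
        rw [show aGo (c :: l.reverse) [] = aGo l.reverse [c] by simp [aGo, hc]]
        rw [aGo_nonempty l.reverse [c] (by simp), ← hcur]
        simp [List.getLast?_append]
    · have hflush : bStep (runs, cur) c = ((if cur ≠ [] then runs ++ [cur] else runs), []) := by
        by_cases h2 : cur = [] <;> simp [bStep, hc, h2]
      rw [hflush]
      refine ⟨by simp [List.takeWhile_cons, hc], ?_, ?_⟩
      · intro r hr
        exact hne r (by simpa using hr)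
      · simp only [ne_eq, not_true_eq_false, if_false, List.reverse_append,
          List.reverse_singleton, List.singleton_append]
        rw [show aGo (c :: l.reverse) [] = aGo l.reverse [] by simp [aGo, hc]]
        simpa using hlast

-- ===== VERDICT (by name: the statement is the Claim_ definition above) =====
theorem device_key_py_spec : Claim_equal_device_key_py := by
  intro s _ _
  show device_key_py s = device_key_py_alt s
  obtain ⟨hcur, hne, hlast⟩ := bFold_inv s.toList
  unfold device_key_py device_key_py_alt
  rcases hf : s.toList.foldl bStep ([], []) with ⟨runs, cur⟩
  rw [hf] at hne hlast
  simp only [hf, PySem.List.pyGet?_neg_one]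
  cases h : (if cur ≠ [] then runs ++ [cur] else runs).getLast? with
  | none =>
    have ha : aGo s.toList.reverse [] = [] := by
      rw [← hlast]; simp only at h ⊢; rw [h]; rfl
    simp [ha, h]
  | some r =>
    have hr : r = aGo s.toList.reverse [] := by
      rw [← hlast]; simp only at h ⊢; rw [h]; rfl
    have hrne : r ≠ [] := hne r (by simpa using List.mem_of_getLast? h)
    rw [← hr]
    simp [h, hrne]
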